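-- pv_equiv track=rewrite | github.com/adhakdh/FOVLeaks | ExperimentalResults/lib/lib.py | classify_by_count_dist
-- ===== SOURCE A (Python) =====
-- def classify_by_count_dist(best_offsets):
--
--     max_hit_count = max(offset[0] for offset in best_offsets)
--
--
--     max_count_results = [result for result in best_offsets if result[0] == max_hit_count]
--
--
--     grouped_results = {}
--     for hit_count, total_dist, matched_keys, offset in max_count_results:
--         matched_keys_tuple = tuple(matched_keys)
--         if matched_keys_tuple not in grouped_results:
--             grouped_results[matched_keys_tuple] = []
--         grouped_results[matched_keys_tuple].append((total_dist, offset))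
--
--
--     best_results = []
--     for keys, results in grouped_results.items():
--         best_result = min(results, key=lambda x: x[0])
--         best_results.append((max_hit_count, best_result[0], keys, best_result[1]))
--
--     return best_results
-- ===== SOURCE B (Python) =====
-- def classify_by_count_dist(best_offsets):
--     max_hit_count = max(offset[0] for offset in best_offsets)
--     best = {}
--     for hit_count, total_dist, matched_keys, offset in best_offsets:
--         if hit_count == max_hit_count:
--             key = tuple(matched_keys)
--             cur = best.get(key)
--             if cur is None or total_dist < cur[0]:
--                 best[key] = (total_dist, offset)
--     return [(max_hit_count, dist, keys, off) for keys, (dist, off) in best.items()]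
-- ===== Notes on version B (the rewrite author's own statement) =====
-- stated objective: alternative
-- what changed: A builds a dict of per-key value lists over the filtered max-count rows and then runs a separate min() pass per group; B makes one pass over best_offsets maintaining a dict from key-tuple directly to the best-so-far (total_dist, offset), updating only on strictly smaller distance, then emits the dict.
-- outside the precondition, e.g. on classify_by_count_dist([]): A raises ValueError, B raises ValueError
import Mathlib
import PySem

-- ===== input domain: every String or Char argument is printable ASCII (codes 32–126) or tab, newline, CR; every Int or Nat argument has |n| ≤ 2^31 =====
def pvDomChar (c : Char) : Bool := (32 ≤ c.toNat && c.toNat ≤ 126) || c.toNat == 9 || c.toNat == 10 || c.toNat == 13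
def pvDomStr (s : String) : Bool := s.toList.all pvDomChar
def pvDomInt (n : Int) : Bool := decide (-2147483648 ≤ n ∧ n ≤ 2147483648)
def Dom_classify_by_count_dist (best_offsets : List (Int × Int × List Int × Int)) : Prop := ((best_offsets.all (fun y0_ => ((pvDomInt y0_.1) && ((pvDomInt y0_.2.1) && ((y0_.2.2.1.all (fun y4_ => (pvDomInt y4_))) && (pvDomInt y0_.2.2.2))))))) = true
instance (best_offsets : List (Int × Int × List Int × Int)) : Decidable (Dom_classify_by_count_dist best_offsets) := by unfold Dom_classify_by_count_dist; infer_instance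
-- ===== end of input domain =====

-- B replaces A's dict-of-lists grouping plus a separate per-group min pass by one incremental
-- best-so-far dict (strict '<' keeps the first minimum), a different decomposition of the same task.


-- ===== PORT A =====
def classify_by_count_dist (best_offsets : List (Int × Int × List Int × Int)) : List (Int × Int × List Int × Int) :=
  match PySem.List.max? (best_offsets.map (fun offset => offset.1)) (fun x => x) with
  | none => []  -- max() of an empty sequence raises ValueError in Python; excluded by Pre_
  | some max_hit_count =>
    let max_count_results := best_offsets.filter (fun result => result.1 == max_hit_count)
    let grouped_results : PySem.Dict (List Int) (List (Int × Int)) :=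
      max_count_results.foldl
        (fun d r =>
          let matched_keys_tuple := r.2.2.1
          let d := if d.contains matched_keys_tuple then d else d.insert matched_keys_tuple []
          -- grouped_results[matched_keys_tuple].append((total_dist, offset))
          d.insert matched_keys_tuple (d.getD matched_keys_tuple [] ++ [(r.2.1, r.2.2.2)]))
        PySem.Dict.empty
    grouped_results.items.foldl
      (fun best_results p =>
        match PySem.List.min? p.2 (fun x => x.1) with
        | none => best_results  -- unreachable: every group list is nonempty
        | some best_result => best_results ++ [(max_hit_count, best_result.1, p.1, best_result.2)])
      []

-- ===== PORT B =====
def classify_by_count_dist_alt (best_offsets : List (Int × Int × List Int × Int)) : List (Int × Int × List Int × Int) :=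
  match PySem.List.max? (best_offsets.map (fun offset => offset.1)) (fun x => x) with
  | none => []  -- max() of an empty sequence raises ValueError in Python; excluded by Pre_
  | some max_hit_count =>
    let best : PySem.Dict (List Int) (Int × Int) :=
      best_offsets.foldl
        (fun d r =>
          if r.1 == max_hit_count then
            match d.get? r.2.2.1 with
            | none => d.insert r.2.2.1 (r.2.1, r.2.2.2)
            | some cur => if r.2.1 < cur.1 then d.insert r.2.2.1 (r.2.1, r.2.2.2) else d
          else d)
        PySem.Dict.empty
    best.items.map (fun p => (max_hit_count, p.2.1, p.1, p.2.2))

-- ===== PRECONDITION & SPEC =====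
-- Pre_ excludes only the empty list, on which Python A (and B) raise ValueError from max().
def Pre_classify_by_count_dist (best_offsets : List (Int × Int × List Int × Int)) : Prop :=
  best_offsets ≠ []
instance (best_offsets : List (Int × Int × List Int × Int)) : Decidable (Pre_classify_by_count_dist best_offsets) := by unfold Pre_classify_by_count_dist; infer_instance
def pvWitness_classify_by_count_dist : (List (Int × Int × List Int × Int)) :=
  [(2, 5, [1, 2], 7), (2, 3, [1, 2], 9), (1, 0, [3], 4), (2, 4, [3], 6)]

def Spec_classify_by_count_dist (best_offsets : List (Int × Int × List Int × Int)) (out : List (Int × Int × List Int × Int)) : Prop := out = classify_by_count_dist_alt best_offsets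
instance (best_offsets : List (Int × Int × List Int × Int)) (out : List (Int × Int × List Int × Int)) : Decidable (Spec_classify_by_count_dist best_offsets out) := by unfold Spec_classify_by_count_dist; infer_instance

-- ===== CLAIM (what is proved, stated in full; the proofs are below) =====
def Claim_equal_classify_by_count_dist : Prop := ∀ (best_offsets : List (Int × Int × List Int × Int)), Dom_classify_by_count_dist best_offsets → Pre_classify_by_count_dist best_offsets → Spec_classify_by_count_dist best_offsets (classify_by_count_dist best_offsets)

-- ===== LEMMAS AND PROOFS =====

-- the key and the (total_dist, offset) value of one row
def pvKey (r : Int × Int × List Int × Int) : List Int := r.2.2.1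
def pvVal (r : Int × Int × List Int × Int) : Int × Int := (r.2.1, r.2.2.2)

-- A's loop body "if absent insert []; then append" is the plain append-modify step
theorem stepA_eq (d : PySem.Dict (List Int) (List (Int × Int))) (k : List Int) (v : Int × Int) :
    (let d' := if d.contains k then d else d.insert k []
     d'.insert k (d'.getD k [] ++ [v])) = d.insert k (d.getD k [] ++ [v]) := by
  by_cases h : d.contains k
  · simp [h]
  · simp only [h, Bool.false_eq_true, if_false]
    rw [PySem.Dict.getD_insert_self, PySem.Dict.getD_of_not_contains d [] (by simpa using h),
      PySem.Dict.insert_insert_self]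

-- B's step restricted to rows of the maximal hit count
def stepB (d : PySem.Dict (List Int) (Int × Int)) (r : Int × Int × List Int × Int) :
    PySem.Dict (List Int) (Int × Int) :=
  match d.get? r.2.2.1 with
  | none => d.insert r.2.2.1 (r.2.1, r.2.2.2)
  | some cur => if r.2.1 < cur.1 then d.insert r.2.2.1 (r.2.1, r.2.2.2) else d

theorem stepB_keys (d : PySem.Dict (List Int) (Int × Int)) (r : Int × Int × List Int × Int) :
    (stepB d r).keys = if d.contains r.2.2.1 then d.keys else d.keys ++ [r.2.2.1] := by
  unfold stepB
  by_cases h : d.contains r.2.2.1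
  · rcases hg : d.get? r.2.2.1 with _ | cur
    · rw [PySem.Dict.get?_eq_none_iff_contains] at hg; simp [hg] at h
    · simp only [h, if_true]
      split <;> simp [PySem.Dict.keys_insert_of_contains _ _ h]
  · have hg : d.get? r.2.2.1 = none := (PySem.Dict.get?_eq_none_iff_contains d _).2 (by simpa using h)
    simp [hg, h, PySem.Dict.keys_insert_of_not_contains _ _ (by simpa using h)]

theorem foldB_keys (l : List (Int × Int × List Int × Int))
    (d : PySem.Dict (List Int) (Int × Int)) :
    (l.foldl stepB d).keys = PySem.Set.update d.keys (l.map pvKey) := by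
  induction l generalizing d with
  | nil => simp [PySem.Set.update]
  | cons r t ih =>
    simp only [List.foldl_cons, List.map_cons, PySem.Set.update_cons, ih]
    congr 1
    rw [stepB_keys]
    by_cases h : d.contains r.2.2.1
    · simp [h, PySem.Set.add, PySem.Set.contains_eq_listContains, List.contains_eq_mem,
        (PySem.Dict.contains_iff_mem_keys d _).1 h, pvKey]
    · have : r.2.2.1 ∉ d.keys := fun hm => h ((PySem.Dict.contains_iff_mem_keys d _).2 hm)
      simp [h, PySem.Set.add, PySem.Set.contains_eq_listContains, List.contains_eq_mem, this, pvKey]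

-- the running minimum B keeps per key, over the values met so far
def combineMin (acc : Option (Int × Int)) (x : Int × Int) : Option (Int × Int) :=
  match acc with
  | none => some x
  | some cur => if x.1 < cur.1 then some x else some cur

theorem foldB_get? (l : List (Int × Int × List Int × Int))
    (d : PySem.Dict (List Int) (Int × Int)) (c : List Int) :
    (l.foldl stepB d).get? c =
      ((l.filter (fun r => r.2.2.1 == c)).map pvVal).foldl combineMin (d.get? c) := by
  induction l generalizing d with
  | nil => simp
  | cons r t ih =>
    simp only [List.foldl_cons, List.filter_cons, ih]
    by_cases hc : r.2.2.1 = c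
    · subst hc
      simp only [beq_self_eq_true, if_true, List.map_cons, List.foldl_cons]
      congr 1
      unfold stepB combineMin
      rcases hg : d.get? r.2.2.1 with _ | cur
      · simp [pvVal]
      · simp only []
        split <;> simp_all [pvVal]
    · have hne : c ≠ r.2.2.1 := fun h => hc h.symm
      have hb : (r.2.2.1 == c) = false := by simpa using hc
      simp only [hb, Bool.false_eq_true, if_false]
      congr 1
      unfold stepB
      rcases hg : d.get? r.2.2.1 with _ | cur
      · exact PySem.Dict.get?_insert_of_ne d _ hne
      · split
        · exact PySem.Dict.get?_insert_of_ne d _ hne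
        · split
          · exact PySem.Dict.get?_insert_of_ne d _ hne
          · rfl

theorem min?_eq_foldl_combineMin (l : List (Int × Int)) :
    PySem.List.min? l (fun x => x.1) = l.foldl combineMin none := by
  simp only [PySem.List.min?]
  induction l with
  | nil => rfl
  | cons h t ih =>
    apply PySem.List.foldl_congr_mem
    intro acc x _
    cases acc <;> rfl

-- ===== VERDICT (by name: the statement is the Claim_ definition above) =====
-- the per-key value list A groups, and the value layer of its emitted result
def pvVals (l : List (Int × Int × List Int × Int)) (c : List Int) : List (Int × Int) :=
  (l.filter (fun r => r.2.2.1 == c)).map pvVal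

theorem pvVals_ne_nil (l : List (Int × Int × List Int × Int)) (c : List Int)
    (hc : c ∈ l.map pvKey) : pvVals l c ≠ [] := by
  rcases List.mem_map.1 hc with ⟨r, hr, hk⟩
  have : r ∈ l.filter (fun r => r.2.2.1 == c) :=
    List.mem_filter.2 ⟨hr, by simpa [pvKey] using hk⟩
  simp only [pvVals, ne_eq, List.map_eq_nil_iff]
  exact fun h => by simp [h] at this

theorem classify_by_count_dist_spec : Claim_equal_classify_by_count_dist := by
  intro bo _ hpre
  unfold Spec_classify_by_count_dist classify_by_count_dist classify_by_count_dist_alt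
  rcases hm : PySem.List.max? (bo.map (fun offset => offset.1)) (fun x => x) with _ | m
  · exact absurd (by simpa using (PySem.List.max?_eq_none_iff _ _).1 hm) hpre
  simp only [hm]
  set l := bo.filter (fun result => result.1 == m) with hl
  -- the B-side fold over bo, skipping non-maximal rows, is the fold of stepB over l
  have hB : bo.foldl
      (fun d r =>
        if r.1 == m then
          match d.get? r.2.2.1 with
          | none => d.insert r.2.2.1 (r.2.1, r.2.2.2)
          | some cur => if r.2.1 < cur.1 then d.insert r.2.2.1 (r.2.1, r.2.2.2) else d
        else d)
      PySem.Dict.empty = l.foldl stepB PySem.Dict.empty := by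
    rw [hl, List.foldl_filter]
    rfl
  -- the A-side grouping fold in plain insert form
  have hA : l.foldl
      (fun d r =>
        let matched_keys_tuple := r.2.2.1
        let d := if d.contains matched_keys_tuple then d else d.insert matched_keys_tuple []
        d.insert matched_keys_tuple (d.getD matched_keys_tuple [] ++ [(r.2.1, r.2.2.2)]))
      PySem.Dict.empty =
      l.foldl (fun d r => d.insert (pvKey r) (d.getD (pvKey r) [] ++ [pvVal r])) PySem.Dict.empty :=
    PySem.List.foldl_congr_mem l _ _ _ (fun acc r _ => stepA_eq acc r.2.2.1 (r.2.1, r.2.2.2))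
  rw [hA, hB]
  set grouped := l.foldl (fun d r => d.insert (pvKey r) (d.getD (pvKey r) [] ++ [pvVal r]))
    PySem.Dict.empty with hgr
  set best := l.foldl stepB PySem.Dict.empty with hbb
  have hkeysA : grouped.keys = PySem.Set.ofList (l.map pvKey) := by
    rw [hgr, PySem.Dict.keys_foldl_insert_key l pvKey _ PySem.Dict.empty]
    simp [PySem.Set.update_nil_left]
  have hkeysB : best.keys = PySem.Set.ofList (l.map pvKey) := by
    rw [hbb, foldB_keys]
    simp [PySem.Set.update_nil_left]
  have hnodup : (PySem.Set.ofList (l.map pvKey) : List (List Int)).Nodup :=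
    PySem.Set.nodup_ofList _
  have hgetA : ∀ c, grouped.getD c [] = pvVals l c := by
    intro c
    have hmapform : grouped =
        (l.map (fun r => (pvKey r, pvVal r))).foldl
          (fun d p => d.modify p.1 [] (fun x => x ++ [p.2])) PySem.Dict.empty := by
      rw [hgr, List.foldl_map]
      rfl
    rw [hmapform, PySem.Dict.getD_foldl_modify_append]
    simp [pvVals, List.filter_map, Function.comp_def, pvKey]
  have hgetB : ∀ c, best.get? c = PySem.List.min? (pvVals l c) (fun x => x.1) := by
    intro c
    rw [hbb, foldB_get? l PySem.Dict.empty c, min?_eq_foldl_combineMin]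
    rfl
  -- each side as a map over the common key list
  have hmin : ∀ c ∈ PySem.Set.ofList (l.map pvKey),
      ∃ b, PySem.List.min? (pvVals l c) (fun x => x.1) = some b := by
    intro c hc
    rcases hx : PySem.List.min? (pvVals l c) (fun x => x.1) with _ | b
    · exact absurd ((PySem.List.min?_eq_none_iff _ _).1 hx)
        (pvVals_ne_nil l c ((PySem.Set.mem_ofList _ _).1 hc))
    · exact ⟨b, rfl⟩
  have hRA : grouped.items.foldl
      (fun best_results p =>
        match PySem.List.min? p.2 (fun x => x.1) with
        | none => best_results
        | some best_result => best_results ++ [(m, best_result.1, p.1, best_result.2)])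
      [] =
      (PySem.Set.ofList (l.map pvKey)).map
        (fun c => (m, ((PySem.List.min? (pvVals l c) (fun x => x.1)).getD (0, 0)).1, c,
          ((PySem.List.min? (pvVals l c) (fun x => x.1)).getD (0, 0)).2)) := by
    rw [PySem.Dict.items_eq_map_keys grouped (hkeysA ▸ hnodup) [], hkeysA, List.foldl_map]
    rw [PySem.List.foldl_congr_mem _ _
      (fun acc c => acc ++ [(m, ((PySem.List.min? (pvVals l c) (fun x => x.1)).getD (0, 0)).1, c,
        ((PySem.List.min? (pvVals l c) (fun x => x.1)).getD (0, 0)).2)]) _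
      (by
        intro acc c hc
        rcases hmin c hc with ⟨b, hb⟩
        simp [hgetA c, hb])]
    simpa using PySem.List.foldl_append_singleton_eq_map _ _ []
  have hRB : best.items.map (fun p => (m, p.2.1, p.1, p.2.2)) =
      (PySem.Set.ofList (l.map pvKey)).map
        (fun c => (m, ((PySem.List.min? (pvVals l c) (fun x => x.1)).getD (0, 0)).1, c,
          ((PySem.List.min? (pvVals l c) (fun x => x.1)).getD (0, 0)).2)) := by
    rw [PySem.Dict.items_eq_map_keys best (hkeysB ▸ hnodup) (0, 0), hkeysB, List.map_map]
    refine List.map_congr_left (fun c hc => ?_)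
    rcases hmin c hc with ⟨b, hb⟩
    simp [PySem.Dict.getD_eq_get?_getD, hgetB c, hb]
  rw [hRA, hRB]
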